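-- pv_equiv track=rewrite | github.com/odiador/competences | 2025-1/rpc09/LegoDP.py | compute_x
-- ===== SOURCE A (Python) =====
-- MOD=10**9+7
--
-- def compute_x(n,k):
--     # return list x(pos) for pos in 0..k-1
--     x=[0]*k
--     for start in range(k):
--         prev=[0]*k
--         prev[start]=1
--         for t in range(1,n):
--             cur=[0]*k
--             for pos in range(k):
--                 if pos>0:
--                     cur[pos]=(cur[pos]+prev[pos-1])%MOD
--                 if pos<k-1:
--                     cur[pos]=(cur[pos]+prev[pos+1])%MOD
--             prev=cur
--         x[start]=sum(prev)%MOD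
--     return x
-- ===== SOURCE B (Python) =====
-- MOD = 10**9 + 7
--
-- def compute_x(n, k):
--     # return list x(pos) for pos in 0..k-1
--     # Single DP on the all-ones vector (the path adjacency matrix is symmetric,
--     # so the total walk count from `start` is the `start` entry of A^(n-1)*1),
--     # each step formed by zipping the right- and left-shifted vectors.
--     v = [1] * k
--     if not v:
--         return v
--     for _ in range(1, n):
--         v = [(a + b) % MOD for a, b in zip([0] + v[:-1], v[1:] + [0])]
--     return v
-- ===== Notes on version B (the rewrite author's own statement) =====
-- stated objective: faster
-- what changed: Instead of running a separate k-step DP from each of the k start vertices and summing, B runs one DP on the all-ones vector (the path adjacency matrix is symmetric), each step built by zipping the two shifted copies of the vector, eliminating the outer loop over starts.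
import Mathlib
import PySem

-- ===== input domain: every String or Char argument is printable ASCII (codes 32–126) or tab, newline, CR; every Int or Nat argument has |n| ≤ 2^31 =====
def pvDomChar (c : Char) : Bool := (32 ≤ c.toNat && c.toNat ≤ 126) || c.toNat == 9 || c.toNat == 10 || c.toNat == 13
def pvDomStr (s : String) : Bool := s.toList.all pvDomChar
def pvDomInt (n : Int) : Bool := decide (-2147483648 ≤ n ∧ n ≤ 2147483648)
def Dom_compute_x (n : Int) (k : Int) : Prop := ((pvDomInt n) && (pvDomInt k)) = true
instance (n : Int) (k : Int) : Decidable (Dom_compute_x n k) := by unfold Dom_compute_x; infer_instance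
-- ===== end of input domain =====

-- B replaces A's k separate walk-DPs (one per start vertex, then a sum) by ONE DP on the
-- all-ones vector, exploiting the symmetry of the path-graph adjacency, with each step
-- built by zipping the two shifted copies of the vector (faster: drops a factor of k).

-- ===== PORT A =====
def pvMOD : Int := 10 ^ 9 + 7

-- one pass of A's inner `for t in range(1,n)` body: builds `cur` from `prev`
-- (prev[pos-1] / prev[pos+1] are always in range under their guards, so getD is exact)
def pvStepA (k : Int) (prev : List Int) : List Int :=
  (PySem.List.pyRange 0 k 1).map (fun pos =>
    let c1 : Int := if pos > 0 then PySem.Int.mod (0 + prev.getD (pos - 1).toNat 0) pvMOD else 0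
    if pos < k - 1 then PySem.Int.mod (c1 + prev.getD (pos + 1).toNat 0) pvMOD else c1)

def compute_x (n : Int) (k : Int) : List Int :=
  (PySem.List.pyRange 0 k 1).map (fun start =>
    PySem.Int.mod
      (((PySem.List.pyRange 1 n 1).foldl (fun prev _ => pvStepA k prev)
        ((List.replicate k.toNat 0).set start.toNat 1)).sum) pvMOD)

-- ===== PORT B =====
-- one pass of B's comprehension: zip([0] + v[:-1], v[1:] + [0])
def pvStepB (v : List Int) : List Int :=
  List.zipWith (fun a b => PySem.Int.mod (a + b) pvMOD)
    (0 :: PySem.List.slice v none (some (-1)))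
    (PySem.List.slice v (some 1) none ++ [0])

def compute_x_alt (n : Int) (k : Int) : List Int :=
  let v := List.replicate k.toNat 1
  if v = [] then v
  else (PySem.List.pyRange 1 n 1).foldl (fun v _ => pvStepB v) v

-- ===== PRECONDITION & SPEC =====
def Spec_compute_x (n : Int) (k : Int) (out : List Int) : Prop := out = compute_x_alt n k
instance (n : Int) (k : Int) (out : List Int) : Decidable (Spec_compute_x n k out) := by unfold Spec_compute_x; infer_instance

-- ===== CLAIM (what is proved, stated in full; the proofs are below) =====
def Claim_equal_compute_x : Prop := ∀ (n : Int) (k : Int), Dom_compute_x n k → Spec_compute_x n k (compute_x n k)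

-- ===== LEMMAS AND PROOFS =====

-- mathematical model (proof-only): vectors as functions ℤ → ℤ supported on [0, k),
-- pvFStep the (mod-free) path-graph adjacency step
def pvFStep (k : Int) (f : Int → Int) : Int → Int :=
  fun p => if 0 ≤ p ∧ p < k then f (p - 1) + f (p + 1) else 0

def pvOnes (k : Int) : Int → Int := fun p => if 0 ≤ p ∧ p < k then 1 else 0

def pvDelta (s : Int) : Int → Int := fun p => if p = s then 1 else 0

def pvSupp (k : Int) (f : Int → Int) : Prop := ∀ p : Int, ¬ (0 ≤ p ∧ p < k) → f p = 0

lemma pvMOD_pos : (0 : Int) < pvMOD := by norm_num [pvMOD]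

lemma pvSupp_ones (k : Int) : pvSupp k (pvOnes k) := by
  intro p hp; simp [pvOnes, hp]

lemma pvSupp_delta {k s : Int} (hs : 0 ≤ s ∧ s < k) : pvSupp k (pvDelta s) := by
  intro p hp
  simp only [pvDelta, ite_eq_right_iff]
  rintro rfl; exact absurd hs hp

lemma pvSupp_fstep (k : Int) (f : Int → Int) : pvSupp k (pvFStep k f) := by
  intro p hp; simp [pvFStep, hp]

lemma pvSupp_iter (k : Int) (f : Int → Int) (h : pvSupp k f) (t : ℕ) :
    pvSupp k ((pvFStep k)^[t] f) := by
  induction t with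
  | zero => simpa
  | succ t ih => rw [Function.iterate_succ_apply']; exact pvSupp_fstep k _

lemma pv_cast_lt {k : Int} {p : ℕ} (hp : p < k.toNat) : 0 ≤ (p : Int) ∧ (p : Int) < k := by
  constructor <;> omega

-- summation by parts on [0,k): shift the index of a product of supported vectors
lemma pvShift {k : Int} {u v : Int → Int} (hu : pvSupp k u) (hv : pvSupp k v) :
    ∑ p ∈ Finset.range k.toNat, u p * v ((p : Int) - 1)
      = ∑ p ∈ Finset.range k.toNat, u ((p : Int) + 1) * v p := by
  rcases Nat.eq_zero_or_pos k.toNat with h0 | hpos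
  · simp [h0]
  · obtain ⟨m, hm⟩ := Nat.exists_eq_succ_of_ne_zero (Nat.pos_iff_ne_zero.mp hpos)
    rw [hm, Finset.sum_range_succ', Finset.sum_range_succ]
    have hv1 : v (-1) = 0 := hv _ (by omega)
    have hu1 : u ((m : Int) + 1) = 0 := hu _ (by omega)
    rw [show ((0 : ℕ) : Int) = 0 by norm_num]
    rw [show (0 : Int) - 1 = -1 by ring, hv1, hu1, mul_zero, zero_mul, add_zero, add_zero]
    refine Finset.sum_congr rfl ?_
    intro p _
    have h1 : ((p + 1 : ℕ) : Int) = (p : Int) + 1 := by push_cast; ring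
    rw [h1]
    ring_nf

-- self-adjointness of the step with respect to the inner product on [0,k)
lemma pvAdj {k : Int} {u v : Int → Int} (hu : pvSupp k u) (hv : pvSupp k v) :
    ∑ p ∈ Finset.range k.toNat, u p * pvFStep k v p
      = ∑ p ∈ Finset.range k.toNat, pvFStep k u p * v p := by
  have hL : ∀ p ∈ Finset.range k.toNat,
      u p * pvFStep k v p = u p * v ((p : Int) - 1) + u p * v ((p : Int) + 1) := by
    intro p hp
    have h := pv_cast_lt (Finset.mem_range.mp hp)
    simp [pvFStep, h, mul_add]
  have hR : ∀ p ∈ Finset.range k.toNat,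
      pvFStep k u p * v p = u ((p : Int) - 1) * v p + u ((p : Int) + 1) * v p := by
    intro p hp
    have h := pv_cast_lt (Finset.mem_range.mp hp)
    simp [pvFStep, h, add_mul]
  rw [Finset.sum_congr rfl hL, Finset.sum_congr rfl hR,
      Finset.sum_add_distrib, Finset.sum_add_distrib, pvShift hu hv]
  have h2 : ∑ p ∈ Finset.range k.toNat, u p * v ((p : Int) + 1)
      = ∑ p ∈ Finset.range k.toNat, u ((p : Int) - 1) * v p := by
    calc ∑ p ∈ Finset.range k.toNat, u p * v ((p : Int) + 1)
        = ∑ p ∈ Finset.range k.toNat, v ((p : Int) + 1) * u p := by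
          refine Finset.sum_congr rfl ?_; intro p _; ring
      _ = ∑ p ∈ Finset.range k.toNat, v p * u ((p : Int) - 1) := (pvShift hv hu).symm
      _ = ∑ p ∈ Finset.range k.toNat, u ((p : Int) - 1) * v p := by
          refine Finset.sum_congr rfl ?_; intro p _; ring
  rw [h2]
  ring

-- ⟨1, M^t v⟩ = ⟨M^t 1, v⟩ for supported v
lemma pvBilin (k : Int) (t : ℕ) (v : Int → Int) (hv : pvSupp k v) :
    ∑ p ∈ Finset.range k.toNat, (pvFStep k)^[t] v p
      = ∑ p ∈ Finset.range k.toNat, (pvFStep k)^[t] (pvOnes k) p * v p := by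
  induction t generalizing v with
  | zero =>
    simp only [Function.iterate_zero, id_eq]
    refine Finset.sum_congr rfl ?_
    intro p hp
    have h := pv_cast_lt (Finset.mem_range.mp hp)
    simp [pvOnes, h]
  | succ t ih =>
    rw [Function.iterate_succ_apply, ih _ (pvSupp_fstep k v),
        pvAdj (pvSupp_iter k _ (pvSupp_ones k) t) hv]
    refine Finset.sum_congr rfl ?_
    intro p _
    rw [Function.iterate_succ_apply']

-- the core identity: total walk count from s = entry s of the all-ones DP
lemma pvCore (k : Int) (t : ℕ) (s : ℕ) (hs : s < k.toNat) :
    ∑ p ∈ Finset.range k.toNat, (pvFStep k)^[t] (pvDelta (s : Int)) p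
      = (pvFStep k)^[t] (pvOnes k) (s : Int) := by
  rw [pvBilin k t _ (pvSupp_delta (pv_cast_lt hs))]
  have h : ∀ p ∈ Finset.range k.toNat,
      (pvFStep k)^[t] (pvOnes k) p * pvDelta (s : Int) p
        = if p = s then (pvFStep k)^[t] (pvOnes k) p else 0 := by
    intro p _
    by_cases hps : p = s
    · simp [pvDelta, hps]
    · have : ((p : Int) = (s : Int)) = False := by
        simp; exact hps
      simp [pvDelta, this, hps]
  rw [Finset.sum_congr rfl h, Finset.sum_ite_eq' (Finset.range k.toNat) s _]
  simp [Finset.mem_range.mpr hs]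

lemma pvFoldl_ignore {α β : Type} (f : α → α) (l : List β) (a : α) :
    l.foldl (fun x _ => f x) a = f^[l.length] a := by
  induction l generalizing a with
  | nil => rfl
  | cons b l ih => simp [List.foldl_cons, ih, Function.iterate_succ_apply]

lemma pvSum_range (f : ℕ → Int) (n : ℕ) :
    ((List.range n).map f).sum = ∑ i ∈ Finset.range n, f i := by
  induction n with
  | zero => simp
  | succ n ih => rw [List.range_succ, Finset.sum_range_succ, List.map_append, List.sum_append, ih]; simp

lemma pvMod_zero : PySem.Int.mod 0 pvMOD = 0 := by
  rw [PySem.Int.mod_eq_emod_of_pos pvMOD_pos]; simp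

lemma pvMod_one : PySem.Int.mod 1 pvMOD = 1 := by
  rw [PySem.Int.mod_eq_emod_of_pos pvMOD_pos]
  exact Int.emod_eq_of_lt (by norm_num) (by norm_num [pvMOD])

-- canonical list form of a vector: entry p is (w p) mod pvMOD
def pvList (k : Int) (w : Int → Int) : List Int :=
  (List.range k.toNat).map (fun p : ℕ => PySem.Int.mod (w (p : Int)) pvMOD)

lemma pvList_length (k : Int) (w : Int → Int) : (pvList k w).length = k.toNat := by
  simp [pvList]

lemma pvList_getElem (k : Int) (w : Int → Int) (i : ℕ) (h : i < (pvList k w).length) :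
    (pvList k w)[i] = PySem.Int.mod (w (i : Int)) pvMOD := by
  simp [pvList]

-- one B step (zip of the two shifted lists) on the canonical list form of a supported vector
lemma pvStepB_map (k : Int) (hk : 0 < k.toNat) (w : Int → Int) (hw : pvSupp k w) :
    pvStepB (pvList k w) = pvList k (pvFStep k w) := by
  have hlen : (pvList k w).length = k.toNat := pvList_length k w
  unfold pvStepB
  rw [PySem.List.slice_to_neg_one, PySem.List.slice_from_one]
  apply List.ext_getElem
  · simp [pvList_length, List.length_zipWith, hlen]
    omega
  · intro i h1 h2
    rw [pvList_length] at h2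
    rw [List.getElem_zipWith]
    have hi : i < k.toNat := by
      simp [List.length_zipWith, hlen] at h1
      omega
    have hik := pv_cast_lt hi
    -- left operand: (0 :: dropLast)[i]
    have hleft : (0 :: (pvList k w).dropLast)[i]'(by simp [hlen]; omega)
        = PySem.Int.mod (w ((i : Int) - 1)) pvMOD := by
      cases i with
      | zero =>
        simp only [List.getElem_cons_zero]
        have : w ((0 : Int) - 1) = 0 := hw _ (by omega)
        rw [show ((0:ℕ) : Int) - 1 = (0:Int) - 1 by norm_num, this, pvMod_zero]
      | succ j =>
        have hj : j < (pvList k w).length := by omega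
        rw [List.getElem_cons_succ, List.getElem_dropLast, pvList_getElem]
        rw [show ((j + 1 : ℕ) : Int) - 1 = (j : Int) by push_cast; ring]
    -- right operand: (tail ++ [0])[i]
    have hright : ((pvList k w).tail ++ [0])[i]'(by simp [hlen]; omega)
        = PySem.Int.mod (w ((i : Int) + 1)) pvMOD := by
      by_cases hlast : i < k.toNat - 1
      · rw [List.getElem_append_left (by simp [hlen]; omega)]
        rw [List.getElem_tail, pvList_getElem]
        rw [show ((i + 1 : ℕ) : Int) = (i : Int) + 1 by push_cast; ring]
      · have hieq : i = k.toNat - 1 := by omega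
        rw [List.getElem_append_right (by simp [hlen]; omega)]
        rw [List.getElem_singleton]
        have : w ((i : Int) + 1) = 0 := hw _ (by omega)
        rw [this, pvMod_zero]
    rw [hleft, hright, pvList_getElem]
    have hstep : pvFStep k w (i : Int) = w ((i : Int) - 1) + w ((i : Int) + 1) := by
      simp [pvFStep, hik]
    rw [hstep]
    simp only [PySem.Int.mod_eq_emod_of_pos pvMOD_pos]
    exact (Int.add_emod _ _ _).symm

lemma pvBIter (k : Int) (hk : 0 < k.toNat) (t : ℕ) :
    pvStepB^[t] (List.replicate k.toNat 1) = pvList k ((pvFStep k)^[t] (pvOnes k)) := by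
  induction t with
  | zero =>
    simp only [Function.iterate_zero, id_eq]
    symm
    unfold pvList
    have h : ∀ p ∈ List.range k.toNat,
        PySem.Int.mod (pvOnes k (p : Int)) pvMOD = (fun _ : ℕ => (1 : Int)) p := by
      intro p hp
      have hpk := pv_cast_lt (List.mem_range.mp hp)
      simp only [pvOnes, if_pos hpk]
      exact pvMod_one
    rw [List.map_congr_left h, List.map_const', List.length_range]
  | succ t ih =>
    rw [Function.iterate_succ_apply', ih,
        pvStepB_map k hk _ (pvSupp_iter k _ (pvSupp_ones k) t), Function.iterate_succ_apply']

-- one A step on the canonical list form of a supported vector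
lemma pvStepA_map (k : Int) (w : Int → Int) (hw : pvSupp k w) :
    pvStepA k (pvList k w) = pvList k (pvFStep k w) := by
  unfold pvStepA pvList
  rw [PySem.List.pyRange_one]
  simp only [sub_zero, List.map_map]
  refine List.map_congr_left ?_
  intro p hp
  have hpK := List.mem_range.mp hp
  have hpk := pv_cast_lt hpK
  simp only [Function.comp_apply, zero_add]
  have hstep : pvFStep k w (p : Int) = w ((p : Int) - 1) + w ((p : Int) + 1) := by
    simp [pvFStep, hpk]
  rw [hstep]
  by_cases h0 : (p : Int) > 0
  · have hidx : ((p : Int) - 1).toNat = p - 1 := by omega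
    have hc1 : (if (p : Int) > 0 then PySem.Int.mod
        (((List.range k.toNat).map (fun q : ℕ => PySem.Int.mod (w (q : Int)) pvMOD)).getD ((p : Int) - 1).toNat 0) pvMOD
        else 0) = PySem.Int.mod (w ((p : Int) - 1)) pvMOD := by
      rw [if_pos h0, hidx, PySem.List.getD_map_range _ _ _ _ (by omega)]
      have hc : ((p - 1 : ℕ) : Int) = (p : Int) - 1 := by omega
      rw [hc]
      simp only [PySem.Int.mod_eq_emod_of_pos pvMOD_pos]
      exact Int.emod_emod_of_dvd _ dvd_rfl
    rw [hc1]
    by_cases h1 : (p : Int) < k - 1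
    · rw [if_pos h1]
      have hidx1 : ((p : Int) + 1).toNat = p + 1 := by omega
      rw [hidx1, PySem.List.getD_map_range _ _ _ _ (by omega)]
      have hc : ((p + 1 : ℕ) : Int) = (p : Int) + 1 := by omega
      rw [hc]
      simp only [PySem.Int.mod_eq_emod_of_pos pvMOD_pos]
      exact (Int.add_emod _ _ _).symm
    · rw [if_neg h1]
      have hz : w ((p : Int) + 1) = 0 := hw _ (by omega)
      rw [hz, add_zero]
  · have hc1 : (if (p : Int) > 0 then PySem.Int.mod
        (((List.range k.toNat).map (fun q : ℕ => PySem.Int.mod (w (q : Int)) pvMOD)).getD ((p : Int) - 1).toNat 0) pvMOD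
        else 0) = 0 := by rw [if_neg h0]
    rw [hc1]
    have hzl : w ((p : Int) - 1) = 0 := hw _ (by omega)
    rw [hzl, zero_add]
    by_cases h1 : (p : Int) < k - 1
    · rw [if_pos h1]
      have hidx1 : ((p : Int) + 1).toNat = p + 1 := by omega
      rw [hidx1, PySem.List.getD_map_range _ _ _ _ (by omega), zero_add]
      have hc : ((p + 1 : ℕ) : Int) = (p : Int) + 1 := by omega
      rw [hc]
      simp only [PySem.Int.mod_eq_emod_of_pos pvMOD_pos]
      exact Int.emod_emod_of_dvd _ dvd_rfl
    · rw [if_neg h1]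
      have hz : w ((p : Int) + 1) = 0 := hw _ (by omega)
      rw [hz]
      simp [pvMod_zero]

lemma pvAIter (k : Int) (s : ℕ) (hs : s < k.toNat) (t : ℕ) :
    (pvStepA k)^[t] ((List.replicate k.toNat 0).set s 1)
      = pvList k ((pvFStep k)^[t] (pvDelta (s : Int))) := by
  induction t with
  | zero =>
    simp only [Function.iterate_zero, id_eq]
    unfold pvList
    apply List.ext_getElem
    · simp
    · intro i h1 h2
      simp only [List.getElem_set, List.getElem_replicate, List.getElem_map, List.getElem_range]
      by_cases his : s = i
      · subst his
        simp only [pvDelta]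
        exact pvMod_one.symm
      · rw [if_neg his]
        simp only [pvDelta]
        rw [if_neg (show ¬ ((i : Int) = (s : Int)) by omega), pvMod_zero]
  | succ t ih =>
    rw [Function.iterate_succ_apply', ih,
        pvStepA_map k _ (pvSupp_iter k _ (pvSupp_delta (pv_cast_lt hs)) t), Function.iterate_succ_apply']

-- ===== VERDICT (by name: the statement is the Claim_ definition above) =====
theorem compute_x_spec : Claim_equal_compute_x := by
  unfold Claim_equal_compute_x Spec_compute_x
  intro n k _
  by_cases hk : k.toNat = 0
  · -- k ≤ 0: both sides are the empty list
    unfold compute_x compute_x_alt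
    rw [PySem.List.pyRange_one 0 k]
    simp [hk]
  · have hkpos : 0 < k.toNat := Nat.pos_of_ne_zero hk
    have hB : compute_x_alt n k
        = pvList k ((pvFStep k)^[(PySem.List.pyRange 1 n 1).length] (pvOnes k)) := by
      unfold compute_x_alt
      rw [if_neg (by simp [List.replicate_eq_nil_iff]; omega)]
      rw [pvFoldl_ignore pvStepB, pvBIter k hkpos]
    rw [hB]
    unfold compute_x
    rw [PySem.List.pyRange_one 0 k]
    unfold pvList
    simp only [sub_zero, List.map_map]
    refine List.map_congr_left ?_
    intro s hs
    have hsK := List.mem_range.mp hs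
    simp only [Function.comp_apply, zero_add, Int.toNat_natCast]
    rw [pvFoldl_ignore (pvStepA k), pvAIter k s hsK]
    unfold pvList
    rw [pvSum_range]
    have hmods : ∀ p ∈ Finset.range k.toNat,
        PySem.Int.mod ((pvFStep k)^[(PySem.List.pyRange 1 n 1).length] (pvDelta (s : Int)) (p : Int)) pvMOD
          = ((pvFStep k)^[(PySem.List.pyRange 1 n 1).length] (pvDelta (s : Int)) (p : Int)) % pvMOD :=
      fun p _ => PySem.Int.mod_eq_emod_of_pos pvMOD_pos
    rw [Finset.sum_congr rfl hmods,
        PySem.Int.mod_eq_emod_of_pos pvMOD_pos, PySem.Int.mod_eq_emod_of_pos pvMOD_pos,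
        ← Finset.sum_int_mod, pvCore k _ s hsK]
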